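-- pv_equiv track=rewrite | github.com/zacheliason/get_in_we_are_taking_down_spotify_wrapped | src/plot_formatting.py | find_cleanest_columns
-- ===== SOURCE A (Python) =====
-- def find_cleanest_columns(N):
-- 	import math
--
-- 	# Find the integer square root (rounded down) of N
-- 	num_columns = int(math.sqrt(N))
--
-- 	# Find the divisors of N (excluding 1 and N)
-- 	divisors = [i for i in range(2, N) if N % i == 0]
--
-- 	# Choose the divisor pair that results in a balanced layout
-- 	min_diff = float('inf')
-- 	best_columns = num_columns
--
-- 	for divisor in divisors:
-- 		columns = N // divisor
-- 		rows = divisor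
-- 		diff = abs(rows - columns)
--
-- 		if diff < min_diff:
-- 			min_diff = diff
-- 			best_columns = columns
--
-- 	return best_columns
-- ===== SOURCE B (Python) =====
-- def find_cleanest_columns(N):
-- 	import math
--
-- 	r = math.isqrt(N)
-- 	a = r
-- 	while a >= 2:
-- 		if N % a == 0:
-- 			return N // a
-- 		a -= 1
-- 	return r
-- ===== Notes on version B (the rewrite author's own statement) =====
-- stated objective: faster
-- what changed: Instead of enumerating every candidate below N and folding over all divisors for the minimal |rows-columns|, B scans downward from math.isqrt(N) to the first (= largest) divisor not exceeding the square root and returns the quotient there, falling back to isqrt(N); Pre_ excludes negative N, where both programs raise ValueError.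
import Mathlib
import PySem

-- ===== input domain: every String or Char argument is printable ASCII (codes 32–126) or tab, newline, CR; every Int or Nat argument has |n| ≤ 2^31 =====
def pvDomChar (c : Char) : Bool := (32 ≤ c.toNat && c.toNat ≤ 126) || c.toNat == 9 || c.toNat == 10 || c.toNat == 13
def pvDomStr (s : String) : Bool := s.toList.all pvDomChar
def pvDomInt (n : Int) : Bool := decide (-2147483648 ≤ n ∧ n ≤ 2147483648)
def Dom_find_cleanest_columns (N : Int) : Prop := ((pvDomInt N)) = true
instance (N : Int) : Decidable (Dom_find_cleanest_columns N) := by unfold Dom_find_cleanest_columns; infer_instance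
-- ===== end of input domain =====

-- B replaces A's O(N) scan over range(2, N) by an O(sqrt N) downward scan from isqrt(N)
-- for the largest divisor a ≤ sqrt(N), returning N // a (fallback isqrt(N)).

-- ===== PORT A =====
-- step function of A's 'for divisor in divisors' loop; min_diff = float('inf') is ported as
-- 'none' (the first iteration always satisfies diff < inf and overwrites the state)
def fccStep (N : Int) (st : Option Int × Int) (divisor : Int) : Option Int × Int :=
  let columns := PySem.Int.floordiv N divisor
  let rows := divisor
  let diff := |rows - columns|
  match st.1 with
  | none => (some diff, columns)
  | some m => if diff < m then (some diff, columns) else st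

-- int(math.sqrt(N)) is ported as the integer square root Nat.sqrt N.toNat: exact on the
-- domain (nonnegative N up to 2^31, where the float sqrt truncates to isqrt); math.sqrt raises on negative N (Pre_).
def find_cleanest_columns (N : Int) : Int :=
  let num_columns : Int := ((N.toNat.sqrt : Nat) : Int)
  let divisors : List Int := (PySem.List.pyRange 2 N).filter (fun i => PySem.Int.mod N i == 0)
  let st := divisors.foldl (fccStep N) (none, num_columns)
  st.2

-- ===== PORT B =====
-- the 'while a >= 2' loop of Source B, scanning a downward; 'return' inside the loop = some
def fccScan (N : Int) : Nat → Option Int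
  | 0 => none
  | 1 => none
  | (a+2) =>
      if PySem.Int.mod N ((a+2 : Nat) : Int) == 0 then some (PySem.Int.floordiv N ((a+2 : Nat) : Int))
      else fccScan N (a+1)

def find_cleanest_columns_alt (N : Int) : Int :=
  let r : Nat := N.toNat.sqrt
  match fccScan N r with
  | some v => v
  | none => (r : Int)

-- ===== PRECONDITION & SPEC =====
-- Pre_ excludes exactly the negative inputs, where Python A raises ValueError (math.sqrt of a negative).
def Pre_find_cleanest_columns (N : Int) : Prop := 0 ≤ N
instance (N : Int) : Decidable (Pre_find_cleanest_columns N) := by unfold Pre_find_cleanest_columns; infer_instance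
def pvWitness_find_cleanest_columns : Int := 12

def Spec_find_cleanest_columns (N : Int) (out : Int) : Prop := out = find_cleanest_columns_alt N
instance (N : Int) (out : Int) : Decidable (Spec_find_cleanest_columns N out) := by unfold Spec_find_cleanest_columns; infer_instance

-- ===== CLAIM (what is proved, stated in full; the proofs are below) =====
def Claim_equal_find_cleanest_columns : Prop := ∀ (N : Int), Dom_find_cleanest_columns N → Pre_find_cleanest_columns N → Spec_find_cleanest_columns N (find_cleanest_columns N)

-- ===== LEMMAS AND PROOFS =====

-- pyRange a b is strictly increasing
lemma pvRange_pairwise (a b : Int) : (PySem.List.pyRange a b).Pairwise (· < ·) := by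
  rw [PySem.List.pyRange_of_pos a b (by norm_num)]
  rw [List.pairwise_map]
  refine List.Pairwise.imp ?_ List.pairwise_lt_range
  intro x y h
  omega

lemma pvRange_nil {a b : Int} (h : b ≤ a) : PySem.List.pyRange a b = [] := by
  rw [PySem.List.pyRange_of_pos a b (by norm_num)]
  simp [show ¬ a < b by omega]

-- splitting a range at a midpoint
lemma pvRange_split (a t b : Int) (h1 : a ≤ t) (h2 : t ≤ b) :
    PySem.List.pyRange a b = PySem.List.pyRange a t ++ PySem.List.pyRange t b := by
  obtain ⟨n, hn⟩ : ∃ n : Nat, t - a = (n : Int) := ⟨(t - a).toNat, by omega⟩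
  induction n generalizing a with
  | zero =>
    have : a = t := by omega
    subst this
    rw [pvRange_nil (le_refl a)]
    simp
  | succ k ih =>
    have hat : a < t := by omega
    rw [PySem.List.pyRange_one_cons (show a < b by omega),
        PySem.List.pyRange_one_cons hat, List.cons_append]
    rw [ih (a + 1) (by omega) (by omega)]

-- c ≤ isqrt N ↔ c² ≤ N, on integers
lemma pvLe_sqrt {N c : Int} (hN : 0 ≤ N) (hc : 0 < c) :
    c ≤ (N.toNat.sqrt : Int) ↔ c * c ≤ N := by
  obtain ⟨m, rfl⟩ : ∃ m : Nat, c = (m : Int) := ⟨c.toNat, by omega⟩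
  obtain ⟨n, rfl⟩ : ∃ n : Nat, N = (n : Int) := ⟨N.toNat, by omega⟩
  rw [Int.toNat_natCast]
  constructor
  · intro h
    have h' : m ≤ n.sqrt := by exact_mod_cast h
    have := Nat.le_sqrt.mp h'
    exact_mod_cast this
  · intro h
    have h' : m * m ≤ n := by exact_mod_cast h
    exact_mod_cast Nat.le_sqrt.mpr h'

-- exact division: complement divisor
lemma pvCompl {N i : Int} (hdvd : i ∣ N) (hi : 0 < i) :
    (N / i) ∣ N ∧ (N / i) * i = N := by
  have h1 : N / i * i = N := Int.ediv_mul_cancel hdvd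
  exact ⟨⟨i, h1.symm⟩, h1⟩

lemma pvCompl_ge_two {N i : Int} (h2 : 2 ≤ i) (hiN : i < N) (hdvd : i ∣ N) (hN : 0 < N) :
    2 ≤ N / i := by
  have h1 : N / i * i = N := Int.ediv_mul_cancel hdvd
  have hpos : 0 < N / i := by nlinarith
  have hne : N / i ≠ 1 := by intro h; rw [h, one_mul] at h1; omega
  omega

-- among positive divisors, N/· is strictly antitone
lemma pvDivAntitone {N c d : Int} (hN : 0 < N) (hc : 0 < c) (hcd : c < d)
    (hcdvd : c ∣ N) (hddvd : d ∣ N) : N / d < N / c := by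
  have h1 : N / c * c = N := Int.ediv_mul_cancel hcdvd
  have h2 : N / d * d = N := Int.ediv_mul_cancel hddvd
  have hc1 : 0 < N / c := by nlinarith
  have hd1 : 0 < N / d := by nlinarith
  by_contra h
  push_neg at h
  nlinarith

-- |d - N/d| for a divisor below the square root
lemma pvDiff_small {N d : Int} (hd : 0 < d) (hsq : d * d ≤ N) :
    |d - N / d| = N / d - d := by
  have hle : d ≤ N / d := (Int.le_ediv_iff_mul_le hd).mpr hsq
  rw [abs_of_nonpos (by omega)]
  ring

-- B's scan: no divisor in [2, a] → none
lemma fccScan_none (N : Int) : ∀ a : Nat, (∀ d : Nat, 2 ≤ d → d ≤ a → ¬((d : Int) ∣ N)) →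
    fccScan N a = none := by
  intro a
  induction a with
  | zero => intro _; rfl
  | succ m ih =>
    intro h
    match m, ih with
    | 0, _ => rfl
    | (k+1), ih =>
      show fccScan N (k+2) = none
      rw [fccScan]
      rw [if_neg (by
        simp only [beq_iff_eq, PySem.Int.mod_eq_zero_iff_dvd]
        exact h (k+2) (by omega) (le_refl _))]
      exact ih (fun d h2 hd => h d h2 (by omega))

-- B's scan: d is the largest divisor in [2, a] → some (N // d)
lemma fccScan_found (N : Int) : ∀ (a d : Nat), 2 ≤ d → d ≤ a → (d : Int) ∣ N →
    (∀ e : Nat, d < e → e ≤ a → ¬((e : Int) ∣ N)) →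
    fccScan N a = some (PySem.Int.floordiv N ((d : Nat) : Int)) := by
  intro a
  induction a with
  | zero => intro d h2 hda _ _; omega
  | succ m ih =>
    intro d h2 hda hdvd hmax
    match m, ih with
    | 0, _ => omega
    | (k+1), ih =>
      show fccScan N (k+2) = _
      rw [fccScan]
      by_cases hcase : (((k+2 : Nat) : Int)) ∣ N
      · have hdk : d = k + 2 := by
          by_contra hne
          exact hmax (k+2) (by omega) (le_refl _) hcase
        subst hdk
        rw [if_pos (by simp only [beq_iff_eq, PySem.Int.mod_eq_zero_iff_dvd]; exact hcase)]
      · have hdne : d ≠ k + 2 := by rintro rfl; exact hcase hdvd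
        rw [if_neg (by simp only [beq_iff_eq, PySem.Int.mod_eq_zero_iff_dvd]; exact hcase)]
        exact ih d h2 (by omega) hdvd (fun e he1 he2 => hmax e he1 (by omega))

-- A's fold over divisors ≤ sqrt: the state tracks the last (largest) one seen
lemma pvFold1 (N : Int) (hN : 0 < N) : ∀ (L : List Int) (c : Int), 0 < c → c ∣ N → c * c ≤ N →
    (∀ d ∈ L, c < d ∧ d ∣ N ∧ d * d ≤ N) → L.Pairwise (· < ·) →
    List.foldl (fccStep N) (some (N / c - c), N / c) L =
      (some (N / (L.getLastD c) - L.getLastD c), N / (L.getLastD c)) := by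
  intro L
  induction L with
  | nil => intro c _ _ _ _ _; rfl
  | cons d L ih =>
    intro c hc hcdvd hcsq hall hpair
    obtain ⟨hcd, hddvd, hdsq⟩ := hall d List.mem_cons_self
    have hd : 0 < d := by omega
    have hlt : N / d - d < N / c - c := by
      have := pvDivAntitone hN hc hcd hcdvd hddvd
      omega
    have hstep : fccStep N (some (N / c - c), N / c) d = (some (N / d - d), N / d) := by
      simp only [fccStep, PySem.Int.floordiv_eq_ediv_of_pos hd]
      rw [pvDiff_small hd hdsq, if_pos hlt]
    rw [List.foldl_cons, hstep, List.getLastD_cons]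
    obtain ⟨hhead, htail⟩ := List.pairwise_cons.mp hpair
    exact ih d hd hddvd hdsq
      (fun e he => ⟨hhead e he, (hall e (List.mem_cons_of_mem _ he)).2⟩) htail

-- A's fold does nothing once no element strictly improves the diff
lemma pvFoldNoop (N m b : Int) : ∀ (L : List Int),
    (∀ d ∈ L, ¬(|d - PySem.Int.floordiv N d| < m)) →
    List.foldl (fccStep N) (some m, b) L = (some m, b) := by
  intro L
  induction L with
  | nil => intro _; rfl
  | cons d L ih =>
    intro h
    have hstep : fccStep N (some m, b) d = (some m, b) := by
      simp only [fccStep]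
      rw [if_neg (h d List.mem_cons_self)]
    rw [List.foldl_cons, hstep]
    exact ih (fun e he => h e (List.mem_cons_of_mem _ he))

-- a sorted list whose maximum is x has last element x
lemma pvLast_eq : ∀ (L : List Int) (c x : Int), x ∈ c :: L → (∀ y ∈ c :: L, y ≤ x) →
    (c :: L).Pairwise (· < ·) → L.getLastD c = x := by
  intro L
  induction L with
  | nil =>
    intro c x hx _ _
    simp only [List.mem_singleton] at hx
    simp [hx]
  | cons d L ih =>
    intro c x hx hub hp
    rw [List.getLastD_cons]
    obtain ⟨hhead, htail⟩ := List.pairwise_cons.mp hp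
    refine ih d x ?_ (fun y hy => hub y (List.mem_cons_of_mem _ hy)) htail
    rcases List.mem_cons.mp hx with rfl | h
    · exfalso
      have hcd : x < d := hhead d List.mem_cons_self
      have := hub d (List.mem_cons_of_mem _ List.mem_cons_self)
      omega
    · exact h

lemma pvMain (N : Int) (h0 : 0 ≤ N) : find_cleanest_columns N = find_cleanest_columns_alt N := by
  have hrsq : ((N.toNat.sqrt : Nat) : Int) * ((N.toNat.sqrt : Nat) : Int) ≤ N := by
    have h := Nat.sqrt_le' N.toNat
    rw [pow_two] at h
    have h2 : ((N.toNat.sqrt * N.toNat.sqrt : Nat) : Int) ≤ ((N.toNat : Nat) : Int) := by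
      exact_mod_cast h
    push_cast at h2
    omega
  set r : Nat := N.toNat.sqrt with hrdef
  set P : Nat → Prop := fun d => 2 ≤ d ∧ ((d : Int) ∣ N) with hPdef
  have hPdec : DecidablePred P := fun d => by rw [hPdef]; infer_instance
  set a : Nat := @Nat.findGreatest P hPdec r with hadef
  by_cases ha : a = 0
  · -- no divisor of N lies in [2, r]: the divisor list is empty, both sides return r
    have hnone : ∀ d : Nat, 0 < d → d ≤ r → ¬ P d := Nat.findGreatest_eq_zero_iff.mp (hadef ▸ ha)
    have hnosmall : ∀ c : Int, 2 ≤ c → c * c ≤ N → ¬ (c ∣ N) := by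
      intro c h2 hsq hdvd
      have hcr : c ≤ (r : Int) := (pvLe_sqrt h0 (by omega)).mpr hsq
      exact hnone c.toNat (by omega) (by omega) ⟨by omega, by rwa [show ((c.toNat : Int)) = c by omega]⟩
    have hD : (PySem.List.pyRange 2 N).filter (fun i => PySem.Int.mod N i == 0) = [] := by
      rw [List.filter_eq_nil_iff]
      intro i hi hcond
      have hdvd : i ∣ N := by
        simpa only [beq_iff_eq, PySem.Int.mod_eq_zero_iff_dvd] using hcond
      have hir := PySem.List.mem_pyRange_one.mp hi
      have hNpos : 0 < N := by omega
      by_cases hsm : i * i ≤ N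
      · exact hnosmall i hir.1 hsm hdvd
      · push_neg at hsm
        obtain ⟨hcdvd, hmul⟩ := pvCompl hdvd (by omega)
        have hc2 : 2 ≤ N / i := pvCompl_ge_two hir.1 hir.2 hdvd hNpos
        have hci : N / i < i := by nlinarith
        have hcsq : (N / i) * (N / i) ≤ N := by nlinarith
        exact hnosmall (N / i) hc2 hcsq hcdvd
    have hscan : fccScan N r = none := fccScan_none N r (by
      intro d h2 hdr hdvd
      exact hnone d (by omega) hdr ⟨h2, hdvd⟩)
    simp only [find_cleanest_columns, find_cleanest_columns_alt, ← hrdef, hD, hscan,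
      List.foldl_nil]
  · -- a is the largest divisor of N in [2, r]; both sides return N / a
    have hPa : P a := Nat.findGreatest_of_ne_zero hadef.symm ha
    obtain ⟨ha2, hadvd⟩ := hPa
    have har : a ≤ r := hadef ▸ Nat.findGreatest_le r
    have ha2' : (2 : Int) ≤ (a : Int) := by exact_mod_cast ha2
    have har' : ((a : Nat) : Int) ≤ (r : Int) := by exact_mod_cast har
    have haA : (a : Int) * a ≤ N := by nlinarith
    have hNpos : 0 < N := by nlinarith
    have haN : (a : Int) < N := by nlinarith
    have hgreatest : ∀ e : Nat, a < e → e ≤ r → ¬ ((e : Int) ∣ N) := by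
      intro e h1 h2 hd
      exact Nat.findGreatest_is_greatest (hadef ▸ h1) h2 ⟨by omega, hd⟩
    have hr2 : 2 ≤ r := le_trans ha2 har
    have hr2' : (2 : Int) ≤ (r : Int) := by exact_mod_cast hr2
    have hrN : (r : Int) + 1 ≤ N := by nlinarith
    have hsplit := pvRange_split 2 ((r : Int) + 1) N (by omega) (by omega)
    set D1 : List Int := (PySem.List.pyRange 2 ((r : Int) + 1)).filter
      (fun i => PySem.Int.mod N i == 0) with hD1def
    set D2 : List Int := (PySem.List.pyRange ((r : Int) + 1) N).filter
      (fun i => PySem.Int.mod N i == 0) with hD2def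
    have hmem1 : ∀ i : Int, i ∈ D1 ↔ (2 ≤ i ∧ i ≤ (r : Int) ∧ i ∣ N) := by
      intro i
      rw [hD1def]
      simp only [List.mem_filter, PySem.List.mem_pyRange_one, beq_iff_eq,
        PySem.Int.mod_eq_zero_iff_dvd]
      constructor
      · rintro ⟨⟨u, v⟩, w⟩; exact ⟨u, by omega, w⟩
      · rintro ⟨u, v, w⟩; exact ⟨⟨u, by omega⟩, w⟩
    have hmem2 : ∀ i : Int, i ∈ D2 ↔ ((r : Int) < i ∧ i < N ∧ i ∣ N) := by
      intro i
      rw [hD2def]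
      simp only [List.mem_filter, PySem.List.mem_pyRange_one, beq_iff_eq,
        PySem.Int.mod_eq_zero_iff_dvd]
      constructor
      · rintro ⟨⟨u, v⟩, w⟩; exact ⟨by omega, v, w⟩
      · rintro ⟨u, v, w⟩; exact ⟨⟨by omega, v⟩, w⟩
    have hpair1 : D1.Pairwise (· < ·) := by
      rw [hD1def]; exact (pvRange_pairwise _ _).filter _
    have haD1 : (a : Int) ∈ D1 := (hmem1 _).mpr ⟨ha2', har', hadvd⟩
    have hub : ∀ y ∈ D1, y ≤ (a : Int) := by
      intro y hy
      obtain ⟨hy2, hyr, hydvd⟩ := (hmem1 y).mp hy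
      by_contra hlt
      push_neg at hlt
      refine hgreatest y.toNat (by omega) (by omega) ?_
      rwa [show ((y.toNat : Int)) = y by omega]
    have ha0' : (0 : Int) < (a : Int) := by omega
    have haval : N / (a : Int) * (a : Int) = N := Int.ediv_mul_cancel hadvd
    -- the fold over D2 changes nothing: every large divisor d has diff ≥ N/a - a
    have hnoop : ∀ d ∈ D2, ¬(|d - PySem.Int.floordiv N d| < N / (a : Int) - (a : Int)) := by
      intro d hd
      obtain ⟨hdr, hdN, hddvd⟩ := (hmem2 d).mp hd
      have hd0 : 0 < d := by omega
      have hdsq : N < d * d := by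
        by_contra hle
        push_neg at hle
        have h := (pvLe_sqrt h0 hd0).mpr hle
        rw [← hrdef] at h
        omega
      obtain ⟨hcdvd', hmul'⟩ := pvCompl hddvd hd0
      have hc2' : 2 ≤ N / d := pvCompl_ge_two (by omega) hdN hddvd hNpos
      have hcd' : N / d < d := by nlinarith
      have hcsq' : (N / d) * (N / d) ≤ N := by nlinarith
      have hcr' : N / d ≤ (r : Int) := by
        have h := (pvLe_sqrt h0 (show (0:Int) < N / d by omega)).mpr hcsq'
        rwa [← hrdef] at h
      have hcA : N / d ≤ (a : Int) := by
        by_contra hgt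
        push_neg at hgt
        refine hgreatest (N / d).toNat (by omega) (by omega) ?_
        rwa [show (((N / d).toNat : Int)) = N / d by omega]
      have hdN' : N / (N / d) = d := by
        have hne : N / d ≠ 0 := by omega
        nth_rewrite 1 [show N = d * (N / d) by linarith]
        exact Int.mul_ediv_cancel d hne
      have habs : |d - PySem.Int.floordiv N d| = d - N / d := by
        rw [PySem.Int.floordiv_eq_ediv_of_pos hd0, abs_of_nonneg (by omega)]
      rw [habs]
      rcases eq_or_lt_of_le hcA with heq | hlt
      · rw [heq] at hdN' ⊢
        omega
      · have := pvDivAntitone hNpos (by omega) hlt hcdvd' hadvd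
        rw [hdN'] at this
        omega
    -- D1 is nonempty (it contains a); fold over it ends in state (N/a - a, N/a)
    cases hD1c : D1 with
    | nil => rw [hD1c] at haD1; simp at haD1
    | cons c L =>
      have hcmem := (hmem1 c).mp (hD1c ▸ List.mem_cons_self)
      have hc0 : 0 < c := by omega
      have hcsq : c * c ≤ N := by nlinarith [hcmem.2.1]
      have hstep1 : fccStep N (none, ((r : Nat) : Int)) c = (some (N / c - c), N / c) := by
        simp only [fccStep, PySem.Int.floordiv_eq_ediv_of_pos hc0]
        rw [pvDiff_small hc0 hcsq]
      have hpairc : (c :: L).Pairwise (· < ·) := hD1c ▸ hpair1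
      obtain ⟨hhead, htail⟩ := List.pairwise_cons.mp hpairc
      have hLfacts : ∀ d ∈ L, c < d ∧ d ∣ N ∧ d * d ≤ N := by
        intro d hdL
        have hdD1 : d ∈ D1 := hD1c ▸ List.mem_cons_of_mem _ hdL
        obtain ⟨hd2, hdr, hddvd⟩ := (hmem1 d).mp hdD1
        exact ⟨hhead d hdL, hddvd, by nlinarith⟩
      have hfold1 := pvFold1 N hNpos L c hc0 hcmem.2.2 hcsq hLfacts htail
      have hlast : L.getLastD c = (a : Int) :=
        pvLast_eq L c (a : Int) (hD1c ▸ haD1) (fun y hy => hub y (hD1c ▸ hy)) hpairc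
      rw [hlast] at hfold1
      have hfold2 := pvFoldNoop N (N / (a : Int) - (a : Int)) (N / (a : Int)) D2 hnoop
      have hscan : fccScan N r = some (PySem.Int.floordiv N ((a : Nat) : Int)) :=
        fccScan_found N r a ha2 har hadvd hgreatest
      have hAval : find_cleanest_columns N = N / (a : Int) := by
        simp only [find_cleanest_columns, ← hrdef]
        rw [hsplit, List.filter_append, ← hD1def, ← hD2def, hD1c, List.foldl_append,
          List.foldl_cons, hstep1, hfold1, hfold2]
      have hBval : find_cleanest_columns_alt N = N / (a : Int) := by
        simp only [find_cleanest_columns_alt, ← hrdef, hscan]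
        exact PySem.Int.floordiv_eq_ediv_of_pos ha0'
      rw [hAval, hBval]

-- ===== VERDICT (by name: the statement is the Claim_ definition above) =====
theorem find_cleanest_columns_spec : Claim_equal_find_cleanest_columns := by
  intro N _ hpre
  unfold Spec_find_cleanest_columns
  exact pvMain N hpre
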